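-- pv_equiv track=rewrite | github.com/nqbao47/med-scan-server | TextDetection/TextRecognition/label_medicines.py | label_medicines
-- ===== SOURCE A (Python) =====
-- def label_medicines(text):
--     # Cách tạm thời
--     # Danh sách các tên thuốc
--     medicine_names = [
--         "Gliclazid",
--         "metformin",
--         "Glumeferm",
--         "Losartan",
--         "Savi",
--         "Atorvastatin",
--         "Clopidogre1",
--         "RIDLOR",
--         "Amlo đipin",
--         "Kavasdin",
--         "Lufocin",
--         "Bromhexin",
--         "Paracetamol",
--         "Ciprofloxacin",
--         "Acenocoumarol",
--         "Spironolacton",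
--         "Metformin",
--         "Giumeform",
--         "Nebivoloi Khouma",
--         "Rosuvastatin",
--         "ROTINVAST",
--         "Acarbose",
--         "BLUECOSE",
--     ]
--
--     # Thay vì chỉ định thì nên gọi danh sách tên thuốc từ database và tiến hành kiểm tra
--
--     # Kiểm tra xem `text` có nằm trong danh sách tên thuốc hay không
--     if any(name in text for name in medicine_names):
--         return "Medicine_Name"
--     else:
--         return "NaN"  # Trả về "NaN" nếu không phải tên thuốc của hệ thống
-- ===== SOURCE B (Python) =====
-- # First-character dispatch table: the 23 medicine names grouped by their first
-- # character, each stored as its tail (name without the first character).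
-- _IDX = {
--     "G": ("liclazid", "lumeferm", "iumeform"),
--     "m": ("etformin",),
--     "L": ("osartan", "ufocin"),
--     "S": ("avi", "pironolacton"),
--     "A": ("torvastatin", "mlo \u0111ipin", "cenocoumarol", "carbose"),
--     "C": ("lopidogre1", "iprofloxacin"),
--     "R": ("IDLOR", "osuvastatin", "OTINVAST"),
--     "K": ("avasdin",),
--     "B": ("romhexin", "LUECOSE"),
--     "P": ("aracetamol",),
--     "M": ("etformin",),
--     "N": ("ebivoloi Khouma",),
-- }
--
--
-- def _match_at(text, i, tail):
--     # does tail occur in text starting at index i? (char-by-char)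
--     for ch in tail:
--         if i >= len(text) or text[i] != ch:
--             return False
--         i += 1
--     return True
--
--
-- def label_medicines(text):
--     # single left-to-right pass: at each character, only the names starting
--     # with that character are candidates
--     for i, c in enumerate(text):
--         for tail in _IDX.get(c, ()):
--             if _match_at(text, i + 1, tail):
--                 return "Medicine_Name"
--     return "NaN"
-- ===== Notes on version B (the rewrite author's own statement) =====
-- stated objective: alternative
-- what changed: A runs 23 independent substring searches (one full scan of the text per medicine name); B makes a single left-to-right pass over the text, dispatching at each character through a precomputed first-character table (names grouped by first letter, stored as tails) and matching the few candidate tails char by char.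
import Mathlib
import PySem

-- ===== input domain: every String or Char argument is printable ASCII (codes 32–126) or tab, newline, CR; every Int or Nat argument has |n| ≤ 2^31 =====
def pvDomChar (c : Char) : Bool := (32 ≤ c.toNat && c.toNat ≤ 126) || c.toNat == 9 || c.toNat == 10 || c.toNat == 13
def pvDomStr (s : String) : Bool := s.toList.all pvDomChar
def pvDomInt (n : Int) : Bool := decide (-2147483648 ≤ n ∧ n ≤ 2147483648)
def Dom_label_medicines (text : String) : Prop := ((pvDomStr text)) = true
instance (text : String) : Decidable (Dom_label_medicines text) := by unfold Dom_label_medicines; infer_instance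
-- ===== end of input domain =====

set_option maxRecDepth 4000


-- B replaces A's 23 independent substring searches by one left-to-right pass over
-- the text with a first-character dispatch table (names grouped by first letter,
-- stored as their tails) and a hand-written char-by-char matcher; same value everywhere.

-- ===== PORT A =====
-- the constant medicine_names list of A
def medicineNames : List String := ["Gliclazid", "metformin", "Glumeferm", "Losartan", "Savi", "Atorvastatin", "Clopidogre1", "RIDLOR", "Amlo đipin", "Kavasdin", "Lufocin", "Bromhexin", "Paracetamol", "Ciprofloxacin", "Acenocoumarol", "Spironolacton", "Metformin", "Giumeform", "Nebivoloi Khouma", "Rosuvastatin", "ROTINVAST", "Acarbose", "BLUECOSE"]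

def label_medicines (text : String) : String :=
  if medicineNames.any (fun name => PySem.Str.isIn name text) then "Medicine_Name"
  else "NaN"

-- ===== PORT B =====
-- _IDX.get(c, ()) of Source B: lookup in the literal first-character table (if-chain = dict-literal lookup)
def tailsFor (c : Char) : List (List Char) :=
  if c = 'G' then [['l', 'i', 'c', 'l', 'a', 'z', 'i', 'd'], ['l', 'u', 'm', 'e', 'f', 'e', 'r', 'm'], ['i', 'u', 'm', 'e', 'f', 'o', 'r', 'm']]
  else if c = 'm' then [['e', 't', 'f', 'o', 'r', 'm', 'i', 'n']]
  else if c = 'L' then [['o', 's', 'a', 'r', 't', 'a', 'n'], ['u', 'f', 'o', 'c', 'i', 'n']]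
  else if c = 'S' then [['a', 'v', 'i'], ['p', 'i', 'r', 'o', 'n', 'o', 'l', 'a', 'c', 't', 'o', 'n']]
  else if c = 'A' then [['t', 'o', 'r', 'v', 'a', 's', 't', 'a', 't', 'i', 'n'], ['m', 'l', 'o', ' ', 'đ', 'i', 'p', 'i', 'n'], ['c', 'e', 'n', 'o', 'c', 'o', 'u', 'm', 'a', 'r', 'o', 'l'], ['c', 'a', 'r', 'b', 'o', 's', 'e']]
  else if c = 'C' then [['l', 'o', 'p', 'i', 'd', 'o', 'g', 'r', 'e', '1'], ['i', 'p', 'r', 'o', 'f', 'l', 'o', 'x', 'a', 'c', 'i', 'n']]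
  else if c = 'R' then [['I', 'D', 'L', 'O', 'R'], ['o', 's', 'u', 'v', 'a', 's', 't', 'a', 't', 'i', 'n'], ['O', 'T', 'I', 'N', 'V', 'A', 'S', 'T']]
  else if c = 'K' then [['a', 'v', 'a', 's', 'd', 'i', 'n']]
  else if c = 'B' then [['r', 'o', 'm', 'h', 'e', 'x', 'i', 'n'], ['L', 'U', 'E', 'C', 'O', 'S', 'E']]
  else if c = 'P' then [['a', 'r', 'a', 'c', 'e', 't', 'a', 'm', 'o', 'l']]
  else if c = 'M' then [['e', 't', 'f', 'o', 'r', 'm', 'i', 'n']]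
  else if c = 'N' then [['e', 'b', 'i', 'v', 'o', 'l', 'o', 'i', ' ', 'K', 'h', 'o', 'u', 'm', 'a']]
  else []

-- _match_at of Source B: char-by-char comparison of a tail against the text from position i
def matchAt : List Char → List Char → Bool
  | [], _ => true
  | _ :: _, [] => false
  | p :: ps, c :: cs => p == c && matchAt ps cs

-- the outer enumerate loop of Source B, as recursion over the remaining suffix
def scanFrom : List Char → Bool
  | [] => false
  | c :: rest => (tailsFor c).any (fun tl => matchAt tl rest) || scanFrom rest

def label_medicines_alt (text : String) : String :=
  if scanFrom text.toList then "Medicine_Name" else "NaN"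

-- ===== PRECONDITION & SPEC =====
def Spec_label_medicines (text : String) (out : String) : Prop := out = label_medicines_alt text
instance (text : String) (out : String) : Decidable (Spec_label_medicines text out) := by unfold Spec_label_medicines; infer_instance

-- ===== CLAIM =====
def Claim_equal_label_medicines : Prop := ∀ (text : String), Dom_label_medicines text → Spec_label_medicines text (label_medicines text)

-- ===== LEMMAS AND PROOFS =====

theorem matchAt_iff (p s : List Char) : matchAt p s = true ↔ p <+: s := by
  induction p generalizing s with
  | nil => simp [matchAt]
  | cons a ps ih =>
    cases s with
    | nil => simp [matchAt]
    | cons c cs =>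
      show (a == c && matchAt ps cs) = true ↔ _
      rw [Bool.and_eq_true, beq_iff_eq, ih, List.cons_prefix_cons]

-- the dispatch table is exactly the name list grouped by first character
theorem mem_tailsFor_iff (c : Char) (tl : List Char) :
    tl ∈ tailsFor c ↔ (c :: tl) ∈ medicineNames.map String.toList := by
  have hmap : medicineNames.map String.toList =
    [['G', 'l', 'i', 'c', 'l', 'a', 'z', 'i', 'd'],
     ['m', 'e', 't', 'f', 'o', 'r', 'm', 'i', 'n'],
     ['G', 'l', 'u', 'm', 'e', 'f', 'e', 'r', 'm'],
     ['L', 'o', 's', 'a', 'r', 't', 'a', 'n'],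
     ['S', 'a', 'v', 'i'],
     ['A', 't', 'o', 'r', 'v', 'a', 's', 't', 'a', 't', 'i', 'n'],
     ['C', 'l', 'o', 'p', 'i', 'd', 'o', 'g', 'r', 'e', '1'],
     ['R', 'I', 'D', 'L', 'O', 'R'],
     ['A', 'm', 'l', 'o', ' ', 'đ', 'i', 'p', 'i', 'n'],
     ['K', 'a', 'v', 'a', 's', 'd', 'i', 'n'],
     ['L', 'u', 'f', 'o', 'c', 'i', 'n'],
     ['B', 'r', 'o', 'm', 'h', 'e', 'x', 'i', 'n'],
     ['P', 'a', 'r', 'a', 'c', 'e', 't', 'a', 'm', 'o', 'l'],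
     ['C', 'i', 'p', 'r', 'o', 'f', 'l', 'o', 'x', 'a', 'c', 'i', 'n'],
     ['A', 'c', 'e', 'n', 'o', 'c', 'o', 'u', 'm', 'a', 'r', 'o', 'l'],
     ['S', 'p', 'i', 'r', 'o', 'n', 'o', 'l', 'a', 'c', 't', 'o', 'n'],
     ['M', 'e', 't', 'f', 'o', 'r', 'm', 'i', 'n'],
     ['G', 'i', 'u', 'm', 'e', 'f', 'o', 'r', 'm'],
     ['N', 'e', 'b', 'i', 'v', 'o', 'l', 'o', 'i', ' ', 'K', 'h', 'o', 'u', 'm', 'a'],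
     ['R', 'o', 's', 'u', 'v', 'a', 's', 't', 'a', 't', 'i', 'n'],
     ['R', 'O', 'T', 'I', 'N', 'V', 'A', 'S', 'T'],
     ['A', 'c', 'a', 'r', 'b', 'o', 's', 'e'],
     ['B', 'L', 'U', 'E', 'C', 'O', 'S', 'E']] := by decide
  rw [hmap]
  clear hmap
  by_cases h1 : c = 'G'
  · subst h1; simp [tailsFor]
  by_cases h2 : c = 'm'
  · subst h2; simp [tailsFor]
  by_cases h3 : c = 'L'
  · subst h3; simp [tailsFor]
  by_cases h4 : c = 'S'
  · subst h4; simp [tailsFor]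
  by_cases h5 : c = 'A'
  · subst h5; simp [tailsFor]
  by_cases h6 : c = 'C'
  · subst h6; simp [tailsFor]
  by_cases h7 : c = 'R'
  · subst h7; simp [tailsFor]
  by_cases h8 : c = 'K'
  · subst h8; simp [tailsFor]
  by_cases h9 : c = 'B'
  · subst h9; simp [tailsFor]
  by_cases h10 : c = 'P'
  · subst h10; simp [tailsFor]
  by_cases h11 : c = 'M'
  · subst h11; simp [tailsFor]
  by_cases h12 : c = 'N'
  · subst h12; simp [tailsFor]
  simp [tailsFor, h1, h2, h3, h4, h5, h6, h7, h8, h9, h10, h11, h12]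

-- B's scan is true iff some name occurs at some position of the text
theorem scanFrom_iff (t : List Char) :
    scanFrom t = true ↔ ∃ name ∈ medicineNames, ∃ j, name.toList <+: t.drop j := by
  have hne : ∀ n ∈ medicineNames, n.toList ≠ [] := by decide
  induction t with
  | nil =>
    simp only [scanFrom]
    constructor
    · intro h; cases h
    · rintro ⟨name, hmem, j, hp⟩
      simp only [List.drop_nil, List.prefix_nil] at hp
      exact absurd hp (hne name hmem)
  | cons c rest ih =>
    simp only [scanFrom, Bool.or_eq_true, List.any_eq_true, ih]
    constructor
    · rintro (⟨tl, htl, hm⟩ | ⟨name, hmem, j, hp⟩)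
      · rcases List.mem_map.mp ((mem_tailsFor_iff c tl).mp htl) with ⟨name, hmem, hEq⟩
        refine ⟨name, hmem, 0, ?_⟩
        rw [List.drop_zero, hEq]
        exact List.cons_prefix_cons.mpr ⟨rfl, (matchAt_iff _ _).mp hm⟩
      · exact ⟨name, hmem, j + 1, by simpa using hp⟩
    · rintro ⟨name, hmem, j, hp⟩
      cases j with
      | zero =>
        left
        rw [List.drop_zero] at hp
        cases hl : name.toList with
        | nil => exact absurd hl (hne name hmem)
        | cons d tl =>
          rw [hl] at hp
          obtain ⟨hdc, htail⟩ := List.cons_prefix_cons.mp hp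
          refine ⟨tl, (mem_tailsFor_iff c tl).mpr
            (List.mem_map.mpr ⟨name, hmem, ?_⟩), (matchAt_iff _ _).mpr htail⟩
          rw [hl, hdc]
      | succ j => exact Or.inr ⟨name, hmem, j, by simpa using hp⟩

-- ===== VERDICT =====
theorem label_medicines_spec : Claim_equal_label_medicines := by
  intro text _
  unfold Spec_label_medicines label_medicines label_medicines_alt
  have h : (medicineNames.any fun name => PySem.Str.isIn name text) = scanFrom text.toList := by
    rw [Bool.eq_iff_iff, List.any_eq_true, scanFrom_iff]
    constructor
    · rintro ⟨name, hmem, hin⟩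
      rcases (PySem.Chars.exists_prefix_drop_iff_isIn name.toList text.toList).mpr
          (by simpa [PySem.Str.isIn] using hin) with ⟨j, hp⟩
      exact ⟨name, hmem, j, hp⟩
    · rintro ⟨name, hmem, j, hp⟩
      have := (PySem.Chars.exists_prefix_drop_iff_isIn name.toList text.toList).mp ⟨j, hp⟩
      exact ⟨name, hmem, by simpa [PySem.Str.isIn] using this⟩
  rw [h]
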